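-- pv_equiv track=rewrite | github.com/shhuan1989/algorithms | codeforces/58D.py | solve
-- ===== SOURCE A (Python) =====
-- def ones(val):
--     count = 0
--     while val > 0:
--         count += 1 if val & 1 > 0 else 0
--         val >>= 1
--     return count
--
-- def solve(N, M, A, G):
--     dp = [[0 for _ in range(N)] for _ in range(1 << N)]
--
--     b = [0 for _ in range(N+1)]
--     b[0] = 1
--     for i in range(1, N+1):
--         b[i] = 2 * b[i-1]
--
--     for i in range(N):
--         dp[b[i]][i] = A[i]
--     for s in range(1 << N):
--         for k in range(N):
--             if s & b[k] > 0:
--                 for w in range(N):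
--                     if w != k and s & b[w] > 0:
--                         dp[s][k] = max(dp[s][k], dp[s ^ b[k]][w] + G[w][k] + A[k])
--
--     ans = max([max(dp[v]) for v in range(b[N]) if ones(v) == M])
--
--     return ans
-- ===== SOURCE B (Python) =====
-- # Alternative decomposition: top-down memoized recursion best(s, k) = best score of a
-- # path ending at vertex k using exactly the vertices in bitmask s (the DP value is
-- # floored at 0 for multi-vertex states, as in the original recurrence), instead of the
-- # bottom-up table over all 2^N rows.
-- def solve(N, M, A, G):
--     memo = {}
--
--     def best(s, k):
--         # requires bit k set in s
--         if (s, k) not in memo: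
--             rest = s ^ (1 << k)
--             if rest == 0:
--                 memo[(s, k)] = A[k]
--             else:
--                 memo[(s, k)] = max([0] + [best(rest, w) + G[w][k] + A[k]
--                                           for w in range(N) if rest >> w & 1])
--         return memo[(s, k)]
--
--     def popcount(v):
--         c = 0
--         while v > 0:
--             c += v & 1
--             v >>= 1
--         return c
--
--     ans = None
--     for s in range(1 << N):
--         if popcount(s) != M:
--             continue
--         cur = max(best(s, k) if s >> k & 1 else 0 for k in range(N))
--         if ans is None or cur > ans:
--             ans = cur
--     return ans
-- ===== Notes on version B (the rewrite author's own statement) =====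
-- stated objective: alternative
-- what changed: Replaces the bottom-up 2^N x N table DP (with an explicit doubling-built power table and per-row max) by a top-down memoized recursion best(s,k) over reachable states plus a single scan over size-M masks.
import Mathlib
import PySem

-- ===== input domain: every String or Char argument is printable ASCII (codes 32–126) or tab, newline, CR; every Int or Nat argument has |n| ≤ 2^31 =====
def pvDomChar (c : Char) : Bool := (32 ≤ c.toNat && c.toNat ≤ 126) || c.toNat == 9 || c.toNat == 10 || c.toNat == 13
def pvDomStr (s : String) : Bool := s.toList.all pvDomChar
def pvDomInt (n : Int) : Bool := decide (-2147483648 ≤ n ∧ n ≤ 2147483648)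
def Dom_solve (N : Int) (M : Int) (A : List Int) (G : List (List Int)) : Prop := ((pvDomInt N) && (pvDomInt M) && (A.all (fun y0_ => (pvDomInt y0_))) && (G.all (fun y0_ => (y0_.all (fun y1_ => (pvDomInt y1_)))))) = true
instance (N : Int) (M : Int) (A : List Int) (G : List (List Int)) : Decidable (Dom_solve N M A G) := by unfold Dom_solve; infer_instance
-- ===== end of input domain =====

-- B replaces A's bottom-up 2^N×N table DP by a top-down memoized recursion best(s,k)
-- over the same recurrence; equivalence of the RETURN value is proved on Pre_solve.

-- ===== PORT A =====
-- Python's `max(xs)`; `pvMax [] = 0` is only reached where Python raises (excluded by Pre_).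
def pvMax : List Int → Int
  | [] => 0
  | x :: xs => xs.foldl max x

-- in-place assignment `dp[s][k] = v` on the 2-d table, modelled as a function update
def pvUpd (dp : Nat → Nat → Int) (s k : Nat) (v : Int) : Nat → Nat → Int :=
  fun s' k' => if s' = s ∧ k' = k then v else dp s' k'

-- A's `ones(val)` loop on a nonnegative value: `val & 1` = `val % 2`, `val >> 1` = `val / 2`.
def pvOnesNat : Nat → Nat
  | 0 => 0
  | (n + 1) => (n + 1) % 2 + pvOnesNat ((n + 1) / 2)
decreasing_by exact Nat.div_lt_self (Nat.succ_pos _) (by omega)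

-- A's `ones(val)` on an int: the while loop runs only while val > 0 (toNat of a nonpositive is 0)
def pvOnes (val : Int) : Int := (pvOnesNat val.toNat : Int)

-- A's table b: b[0] = 1; b[i] = 2 * b[i-1]
def pvTwoPow : Nat → Nat
  | 0 => 1
  | (i + 1) => 2 * pvTwoPow i

def solve (N : Int) (M : Int) (A : List Int) (G : List (List Int)) : Int :=
  let n := N.toNat
  -- dp = [[0]*N for _ in range(1<<N)]; for i in range(N): dp[b[i]][i] = A[i]
  let dp1 := (List.range n).foldl
    (fun dp i => pvUpd dp (pvTwoPow i) i (A.getD i 0)) (fun _ _ => (0 : Int))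
  -- the triple loop (indices used are in range under Pre_, so getD is exact)
  let dp2 := (List.range (1 <<< n)).foldl (fun dp s =>
    (List.range n).foldl (fun dp k =>
      if s &&& pvTwoPow k > 0 then
        (List.range n).foldl (fun dp w =>
          if w ≠ k ∧ s &&& pvTwoPow w > 0 then
            pvUpd dp s k (max (dp s k)
              (dp (s ^^^ pvTwoPow k) w + (G.getD w []).getD k 0 + A.getD k 0))
          else dp) dp
      else dp) dp) dp1
  -- ans = max([max(dp[v]) for v in range(b[N]) if ones(v) == M])
  pvMax ((List.range (pvTwoPow n)).filterMap (fun v =>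
    if pvOnes (Int.ofNat v) = M then some (pvMax ((List.range n).map (fun k => dp2 v k)))
    else none))

-- ===== PORT B =====
-- termination of best: removing a set bit strictly decreases the mask
theorem pvXorLt (s k : Nat) (h : s.testBit k = true) : s ^^^ (1 <<< k) < s := by
  refine Nat.lt_of_testBit k ?_ h ?_
  · simp [Nat.testBit_xor, Nat.one_shiftLeft, h]
  · intro j hj
    simp [Nat.testBit_xor, Nat.one_shiftLeft, hj.ne]

-- B's memoized `best(s, k)`: memoization does not change the value, so the port is the
-- same recursion (well-founded on the mask); the dead `k not in s` branch returns 0.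
def bestB (n : Nat) (A : List Int) (G : List (List Int)) (s k : Nat) : Int :=
  if htb : s.testBit k = true then
    let rest := s ^^^ (1 <<< k)
    if rest = 0 then A.getD k 0
    else pvMax (0 :: (List.range n).filterMap (fun w =>
      if rest.testBit w then
        some (bestB n A G rest w + (G.getD w []).getD k 0 + A.getD k 0)
      else none))
  else 0
termination_by s
decreasing_by exact pvXorLt s k htb

def solve_alt (N : Int) (M : Int) (A : List Int) (G : List (List Int)) : Int :=
  let n := N.toNat
  -- B's popcount(v) is the same bit loop as A's ones, hence the shared helper pvOnes
  let res := (List.range (1 <<< n)).foldl (fun acc s =>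
    if pvOnes (Int.ofNat s) ≠ M then acc
    else
      let cur := pvMax ((List.range n).map (fun k =>
        if s.testBit k then bestB n A G s k else 0))
      match acc with
      | none => some cur
      | some a => if cur > a then some cur else some a) (none : Option Int)
  -- Python B returns `ans`, still None when no mask qualifies (A raises there; outside Pre_)
  res.getD 0

-- ===== PRECONDITION & SPEC =====
-- Pre_ excludes exactly the inputs where the Python A raises: N ≤ 0 or M outside [0, N]
-- make the final max() see an empty sequence (or `1 << N` fail), a short A raises
-- IndexError, and for N ≥ 2 the loops read G[w][k] for every pair w ≠ k below N
-- (so the last row is only indexed up to N-2).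
def Pre_solve (N : Int) (M : Int) (A : List Int) (G : List (List Int)) : Prop :=
  1 ≤ N ∧ 0 ≤ M ∧ M ≤ N ∧ N.toNat ≤ A.length ∧
    (2 ≤ N → N.toNat ≤ G.length ∧
      ∀ w < N.toNat,
        (if w = N.toNat - 1 then N.toNat - 1 else N.toNat) ≤ (G.getD w []).length)
instance (N : Int) (M : Int) (A : List Int) (G : List (List Int)) : Decidable (Pre_solve N M A G) := by unfold Pre_solve; infer_instance

def pvWitness_solve : Int × Int × List Int × List (List Int) :=
  (2, 1, [3, -1], [[0, 5], [5, 0]])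

def Spec_solve (N : Int) (M : Int) (A : List Int) (G : List (List Int)) (out : Int) : Prop := out = solve_alt N M A G
instance (N : Int) (M : Int) (A : List Int) (G : List (List Int)) (out : Int) : Decidable (Spec_solve N M A G out) := by unfold Spec_solve; infer_instance

-- ===== CLAIM (what is proved, stated in full; the proofs are below) =====
def Claim_equal_solve : Prop := ∀ (N : Int) (M : Int) (A : List Int) (G : List (List Int)), Dom_solve N M A G → Pre_solve N M A G → Spec_solve N M A G (solve N M A G)

-- ===== LEMMAS AND PROOFS =====

theorem pvTwoPow_eq (i : Nat) : pvTwoPow i = 2 ^ i := by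
  induction i with
  | zero => rfl
  | succ i ih => simp [pvTwoPow, ih, Nat.pow_succ]; ring

theorem pvAndPos (m k : Nat) : (0 < m &&& pvTwoPow k) ↔ m.testBit k = true := by
  rw [pvTwoPow_eq, Nat.and_two_pow]
  cases h : m.testBit k <;> simp_all

@[simp] theorem pvUpd_same (dp : Nat → Nat → Int) (s k : Nat) (v : Int) :
    pvUpd dp s k v s k = v := by simp [pvUpd]

theorem pvUpd_ne (dp : Nat → Nat → Int) (s k s' k' : Nat) (v : Int)
    (h : ¬(s' = s ∧ k' = k)) : pvUpd dp s k v s' k' = dp s' k' := by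
  simp [pvUpd, h]

theorem pvUpd_pvUpd (dp : Nat → Nat → Int) (s k : Nat) (v w : Int) :
    pvUpd (pvUpd dp s k v) s k w = pvUpd dp s k w := by
  funext s' k'; by_cases h : s' = s ∧ k' = k <;> simp [pvUpd, h]

theorem pvUpd_self (dp : Nat → Nat → Int) (s k : Nat) :
    pvUpd dp s k (dp s k) = dp := by
  funext s' k'
  by_cases h : s' = s ∧ k' = k
  · simp [pvUpd, h.1, h.2]
  · simp [pvUpd, h]

-- bits of s ^^^ 2^k
theorem pvTestBit_rest (s k w : Nat) (hs : s.testBit k = true) :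
    (s ^^^ pvTwoPow k).testBit w = (decide (w ≠ k) && s.testBit w) := by
  rw [pvTwoPow_eq]
  by_cases h : w = k
  · subst h; simp [Nat.testBit_xor, hs]
  · have h' : ¬ (k = w) := fun hh => h hh.symm
    simp [Nat.testBit_xor, h, h']

theorem pvRest_lt (s k : Nat) (hs : s.testBit k = true) : s ^^^ pvTwoPow k < s := by
  rw [pvTwoPow_eq, ← Nat.one_shiftLeft]; exact pvXorLt s k hs

theorem pvRest_eq_zero (s k : Nat) : s ^^^ pvTwoPow k = 0 ↔ s = pvTwoPow k := by
  constructor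
  · intro h
    have := congrArg (· ^^^ pvTwoPow k) h
    simpa [Nat.xor_assoc] using this
  · intro h; simp [h]

-- the base initialisation: dp1 s k = A[k] at (2^k, k) for k < m, 0 elsewhere
theorem pvBase_eval (A : List Int) (z : Nat → Nat → Int) :
    ∀ (m : Nat) (s k : Nat),
      ((List.range m).foldl (fun dp i => pvUpd dp (pvTwoPow i) i (A.getD i 0)) z) s k
        = if k < m ∧ s = pvTwoPow k then A.getD k 0 else z s k := by
  intro m
  induction m with
  | zero => simp
  | succ m ih =>
    intro s k
    rw [List.range_succ, List.foldl_append]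
    simp only [List.foldl_cons, List.foldl_nil]
    by_cases h : s = pvTwoPow m ∧ k = m
    · obtain ⟨h1, h2⟩ := h; subst h2; simp [h1]
    · rw [pvUpd_ne _ _ _ _ _ _ h, ih]
      by_cases hk : k = m
      · subst hk
        have hs : ¬ s = pvTwoPow k := fun hh => h ⟨hh, rfl⟩
        simp [hs]
      · have : (k < m + 1 ∧ s = pvTwoPow k) ↔ (k < m ∧ s = pvTwoPow k) := by
          constructor <;> rintro ⟨a, b⟩ <;> exact ⟨by omega, b⟩
        rw [if_congr this rfl rfl]

-- generic: a guarded fold that only updates cell (s, k) is one function update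
theorem pvInnerFold (s k r : Nat) (hr : r ≠ s) (c : Nat → Int) (e : Int)
    (P : Nat → Prop) [DecidablePred P] :
    ∀ (l : List Nat) (dp : Nat → Nat → Int),
      l.foldl (fun dp w =>
          if P w then pvUpd dp s k (max (dp s k) (dp r w + c w + e)) else dp) dp
        = pvUpd dp s k
            (l.foldl (fun a w => if P w then max a (dp r w + c w + e) else a) (dp s k)) := by
  intro l
  induction l with
  | nil => intro dp; simp [pvUpd_self]
  | cons w l ih =>
    intro dp
    simp only [List.foldl_cons]
    by_cases hp : P w
    · rw [if_pos hp, if_pos hp, ih]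
      have hrw : ∀ w', (pvUpd dp s k (max (dp s k) (dp r w + c w + e))) r w' = dp r w' := by
        intro w'; exact pvUpd_ne _ _ _ _ _ _ (by simp [hr])
      simp only [hrw, pvUpd_same, pvUpd_pvUpd]
    · rw [if_neg hp, if_neg hp, ih]

-- generic: a guarded accumulator fold is a fold over the filtered candidate list
theorem pvFoldFilter {β : Type} (P : Nat → Prop) [DecidablePred P]
    (f : Nat → Int) (op : β → Int → β) :
    ∀ (l : List Nat) (a : β),
      l.foldl (fun a w => if P w then op a (f w) else a) a
        = ((l.filterMap fun w => if P w then some (f w) else none).foldl op a) := by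
  intro l
  induction l with
  | nil => intro a; simp
  | cons w l ih =>
    intro a
    by_cases hp : P w <;> simp [hp, ih]

-- the option-max accumulation of B is Python's max over the collected list
theorem pvOptFold_aux :
    ∀ (L : List Int) (a : Int),
      L.foldl (fun acc cur => match acc with
        | none => some cur
        | some a => if cur > a then some cur else some a) (some a)
        = some (L.foldl max a) := by
  intro L
  induction L with
  | nil => intro a; simp
  | cons x L ih =>
    intro a
    simp only [List.foldl_cons]
    show L.foldl _ (if x > a then some x else some a) = some (L.foldl max (max a x))
    by_cases h : x > a
    · rw [if_pos h, ih, max_eq_right (le_of_lt h)]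
    · rw [if_neg h, ih, max_eq_left (not_lt.mp h)]

theorem pvOptFold (L : List Int) :
    (L.foldl (fun acc cur => match acc with
      | none => some cur
      | some a => if cur > a then some cur else some a) none).getD 0 = pvMax L := by
  cases L with
  | nil => rfl
  | cons x L => simp [pvMax, pvOptFold_aux]

-- proof-side abbreviations for A's row processing
def pvKStep (n : Nat) (A : List Int) (G : List (List Int)) (s : Nat)
    (dp : Nat → Nat → Int) (k : Nat) : Nat → Nat → Int :=
  if s &&& pvTwoPow k > 0 then
    (List.range n).foldl (fun dp w =>
      if w ≠ k ∧ s &&& pvTwoPow w > 0 then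
        pvUpd dp s k (max (dp s k)
          (dp (s ^^^ pvTwoPow k) w + (G.getD w []).getD k 0 + A.getD k 0))
      else dp) dp
  else dp

def pvRowVal (n : Nat) (A : List Int) (G : List (List Int))
    (dp0 : Nat → Nat → Int) (s k : Nat) : Int :=
  (List.range n).foldl (fun a w =>
    if w ≠ k ∧ s &&& pvTwoPow w > 0 then
      max a (dp0 (s ^^^ pvTwoPow k) w + (G.getD w []).getD k 0 + A.getD k 0)
    else a) (dp0 s k)

theorem pvKStep_eval (n : Nat) (A : List Int) (G : List (List Int)) (s : Nat)
    (dp : Nat → Nat → Int) (k : Nat) :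
    pvKStep n A G s dp k
      = if s &&& pvTwoPow k > 0 then pvUpd dp s k (pvRowVal n A G dp s k) else dp := by
  unfold pvKStep pvRowVal
  by_cases hc : s &&& pvTwoPow k > 0
  · rw [if_pos hc, if_pos hc]
    have htb : s.testBit k = true := (pvAndPos s k).mp hc
    have hr : s ^^^ pvTwoPow k ≠ s := Nat.ne_of_lt (pvRest_lt s k htb)
    exact pvInnerFold s k (s ^^^ pvTwoPow k) hr
      (fun w => (G.getD w []).getD k 0) (A.getD k 0)
      (fun w => w ≠ k ∧ s &&& pvTwoPow w > 0) (List.range n) dp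
  · rw [if_neg hc, if_neg hc]

theorem pvRowVal_congr (n : Nat) (A : List Int) (G : List (List Int))
    (s k : Nat) (d1 d2 : Nat → Nat → Int) (h1 : d1 s k = d2 s k)
    (h2 : ∀ w, d1 (s ^^^ pvTwoPow k) w = d2 (s ^^^ pvTwoPow k) w) :
    pvRowVal n A G d1 s k = pvRowVal n A G d2 s k := by
  unfold pvRowVal
  rw [h1]
  have : (fun (a : Int) w =>
      if w ≠ k ∧ s &&& pvTwoPow w > 0 then
        max a (d1 (s ^^^ pvTwoPow k) w + (G.getD w []).getD k 0 + A.getD k 0)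
      else a)
      = (fun (a : Int) w =>
      if w ≠ k ∧ s &&& pvTwoPow w > 0 then
        max a (d2 (s ^^^ pvTwoPow k) w + (G.getD w []).getD k 0 + A.getD k 0)
      else a) := by
    funext a w; rw [h2]
  rw [this]

-- processing one row only rewrites the in-row, in-mask cells, to the row value
theorem pvRowFold (n : Nat) (A : List Int) (G : List (List Int)) (m : Nat) :
    ∀ (l : List Nat), l.Nodup → ∀ (dp dp0 : Nat → Nat → Int),
      (∀ r w, r ≠ m → dp r w = dp0 r w) →
      (∀ k ∈ l, dp m k = dp0 m k) →
      ∀ s' k', (l.foldl (pvKStep n A G m) dp) s' k'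
        = if s' = m ∧ k' ∈ l ∧ m &&& pvTwoPow k' > 0 then pvRowVal n A G dp0 m k'
          else dp s' k' := by
  intro l
  induction l with
  | nil => intro _ dp dp0 _ _ s' k'; simp
  | cons k l ih =>
    intro hnd dp dp0 hne hm s' k'
    obtain ⟨hkl, hl⟩ := List.nodup_cons.mp hnd
    rw [List.foldl_cons, pvKStep_eval]
    by_cases hc : m &&& pvTwoPow k > 0
    · rw [if_pos hc]
      have htb : m.testBit k = true := (pvAndPos m k).mp hc
      have hrest : m ^^^ pvTwoPow k ≠ m := Nat.ne_of_lt (pvRest_lt m k htb)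
      have hval : pvRowVal n A G dp m k = pvRowVal n A G dp0 m k :=
        pvRowVal_congr n A G m k dp dp0 (hm k (List.mem_cons_self))
          (fun w => hne _ w hrest)
      have h1 : ∀ r w, r ≠ m →
          pvUpd dp m k (pvRowVal n A G dp m k) r w = dp0 r w := by
        intro r w hr
        rw [pvUpd_ne _ _ _ _ _ _ (fun hh => hr hh.1), hne r w hr]
      have h2 : ∀ k'' ∈ l, pvUpd dp m k (pvRowVal n A G dp m k) m k'' = dp0 m k'' := by
        intro k'' hk''
        have hkk : k'' ≠ k := fun h => hkl (h ▸ hk'')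
        rw [pvUpd_ne _ _ _ _ _ _ (fun hh => hkk hh.2),
          hm k'' (List.mem_cons_of_mem _ hk'')]
      rw [ih hl _ dp0 h1 h2 s' k']
      by_cases hA : s' = m ∧ k' ∈ l ∧ m &&& pvTwoPow k' > 0
      · rw [if_pos hA, if_pos ⟨hA.1, List.mem_cons_of_mem _ hA.2.1, hA.2.2⟩]
      · rw [if_neg hA]
        by_cases hB : s' = m ∧ k' = k
        · obtain ⟨e1, e2⟩ := hB
          subst e1; subst e2
          rw [pvUpd_same, hval, if_pos ⟨rfl, List.mem_cons_self, hc⟩]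
        · rw [pvUpd_ne _ _ _ _ _ _ hB]
          have hno : ¬(s' = m ∧ k' ∈ k :: l ∧ m &&& pvTwoPow k' > 0) := by
            rintro ⟨e1, hmem, hck'⟩
            rcases List.mem_cons.mp hmem with h | h
            · exact hB ⟨e1, h⟩
            · exact hA ⟨e1, h, hck'⟩
          rw [if_neg hno]
    · rw [if_neg hc]
      rw [ih hl dp dp0 hne (fun k'' h => hm k'' (List.mem_cons_of_mem _ h)) s' k']
      by_cases hA : s' = m ∧ k' ∈ l ∧ m &&& pvTwoPow k' > 0
      · rw [if_pos hA, if_pos ⟨hA.1, List.mem_cons_of_mem _ hA.2.1, hA.2.2⟩]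
      · rw [if_neg hA]
        have hno : ¬(s' = m ∧ k' ∈ k :: l ∧ m &&& pvTwoPow k' > 0) := by
          rintro ⟨e1, hmem, hck'⟩
          rcases List.mem_cons.mp hmem with h | h
          · subst h; exact hc hck'
          · exact hA ⟨e1, h, hck'⟩
        rw [if_neg hno]

-- the row value computed from the already-correct lower rows is B's best
theorem pvRowVal_bestB (n : Nat) (A : List Int) (G : List (List Int)) (m k : Nat)
    (hk : k < n) (htb : m.testBit k = true) (dpm : Nat → Nat → Int)
    (hdpm : ∀ s' k', dpm s' k'
      = if s' < m ∧ k' < n ∧ s'.testBit k' = true then bestB n A G s' k'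
        else if k' < n ∧ s' = pvTwoPow k' then A.getD k' 0 else 0) :
    pvRowVal n A G dpm m k = bestB n A G m k := by
  have hshift : (1 : Nat) <<< k = pvTwoPow k := by
    rw [Nat.one_shiftLeft, pvTwoPow_eq]
  unfold pvRowVal
  rw [pvFoldFilter (fun w => w ≠ k ∧ m &&& pvTwoPow w > 0)
    (fun w => dpm (m ^^^ pvTwoPow k) w + (G.getD w []).getD k 0 + A.getD k 0) max]
  rw [bestB, dif_pos htb]
  simp only [hshift]
  by_cases hz : m ^^^ pvTwoPow k = 0
  · rw [if_pos hz]
    have hm2 : m = pvTwoPow k := (pvRest_eq_zero m k).mp hz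
    have hnil : ((List.range n).filterMap (fun w =>
        if w ≠ k ∧ m &&& pvTwoPow w > 0 then
          some (dpm (m ^^^ pvTwoPow k) w + (G.getD w []).getD k 0 + A.getD k 0)
        else none)) = [] := by
      rw [List.filterMap_eq_nil_iff]
      intro w _
      have : ¬(w ≠ k ∧ m &&& pvTwoPow w > 0) := by
        rintro ⟨hwk, hcw⟩
        have : m.testBit w = true := (pvAndPos m w).mp hcw
        rw [hm2, pvTwoPow_eq, Nat.testBit_two_pow] at this
        exact hwk (of_decide_eq_true this).symm
      simp [this]
    rw [hnil]
    simp only [List.foldl_nil]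
    rw [hdpm]
    simp [hk, hm2]
  · rw [if_neg hz]
    have ha0 : dpm m k = 0 := by
      rw [hdpm]
      have hm2 : ¬ m = pvTwoPow k := fun h => hz (by rw [h, Nat.xor_self])
      simp [hm2]
    rw [ha0]
    show _ = pvMax (0 :: _)
    unfold pvMax
    congr 1
    apply List.filterMap_congr
    intro w hw
    have hwn : w < n := List.mem_range.mp hw
    have hcond : ((m ^^^ pvTwoPow k).testBit w = true) ↔ (w ≠ k ∧ m &&& pvTwoPow w > 0) := by
      rw [pvTestBit_rest m k w htb]
      constructor
      · intro h
        have := Bool.and_eq_true_iff.mp h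
        exact ⟨of_decide_eq_true this.1, (pvAndPos m w).mpr this.2⟩
      · rintro ⟨h1, h2⟩
        simp [h1, (pvAndPos m w).mp h2]
    by_cases hP : w ≠ k ∧ m &&& pvTwoPow w > 0
    · rw [if_pos hP, if_pos (hcond.mpr hP)]
      have hlt : m ^^^ pvTwoPow k < m := pvRest_lt m k htb
      have htbr : (m ^^^ pvTwoPow k).testBit w = true := hcond.mpr hP
      rw [hdpm]
      rw [if_pos ⟨hlt, hwn, htbr⟩]
    · rw [if_neg hP, if_neg (fun h => hP (hcond.mp h))]

-- the final value of A's table on the processed rows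
theorem pvMainFold (n : Nat) (A : List Int) (G : List (List Int)) :
    ∀ (m : Nat) (s k : Nat),
      ((List.range m).foldl (fun dp s =>
          (List.range n).foldl (fun dp k =>
            if s &&& pvTwoPow k > 0 then
              (List.range n).foldl (fun dp w =>
                if w ≠ k ∧ s &&& pvTwoPow w > 0 then
                  pvUpd dp s k (max (dp s k)
                    (dp (s ^^^ pvTwoPow k) w + (G.getD w []).getD k 0 + A.getD k 0))
                else dp) dp
            else dp) dp)
        ((List.range n).foldl (fun dp i => pvUpd dp (pvTwoPow i) i (A.getD i 0))
          (fun _ _ => (0 : Int)))) s k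
      = if s < m ∧ k < n ∧ s.testBit k = true then bestB n A G s k
        else if k < n ∧ s = pvTwoPow k then A.getD k 0 else 0 := by
  have hstep : (fun (dp : Nat → Nat → Int) (s : Nat) =>
      (List.range n).foldl (fun dp k =>
        if s &&& pvTwoPow k > 0 then
          (List.range n).foldl (fun dp w =>
            if w ≠ k ∧ s &&& pvTwoPow w > 0 then
              pvUpd dp s k (max (dp s k)
                (dp (s ^^^ pvTwoPow k) w + (G.getD w []).getD k 0 + A.getD k 0))
            else dp) dp
        else dp) dp)
      = fun dp s => (List.range n).foldl (pvKStep n A G s) dp := rfl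
  rw [hstep]
  intro m
  induction m with
  | zero =>
    intro s k
    simp only [List.range_zero, List.foldl_nil]
    rw [pvBase_eval]
    have : ¬(s < 0 ∧ k < n ∧ s.testBit k = true) := by rintro ⟨h, _⟩; omega
    rw [if_neg this]
  | succ m ih =>
    intro s k
    rw [List.range_succ, List.foldl_append, List.foldl_cons, List.foldl_nil]
    rw [pvRowFold n A G m (List.range n) List.nodup_range _ _
      (fun _ _ _ => rfl) (fun _ _ => rfl) s k]
    by_cases hA : s = m ∧ k ∈ List.range n ∧ m &&& pvTwoPow k > 0
    · rw [if_pos hA]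
      obtain ⟨e1, hkr, hc⟩ := hA
      subst e1
      have hk : k < n := List.mem_range.mp hkr
      have htb : s.testBit k = true := (pvAndPos s k).mp hc
      rw [pvRowVal_bestB n A G s k hk htb _ ih]
      rw [if_pos ⟨Nat.lt_succ_self s, hk, htb⟩]
    · rw [if_neg hA, ih s k]
      by_cases h1 : s < m ∧ k < n ∧ s.testBit k = true
      · rw [if_pos h1, if_pos ⟨by omega, h1.2⟩]
      · rw [if_neg h1]
        have h2 : ¬(s < m + 1 ∧ k < n ∧ s.testBit k = true) := by
          rintro ⟨hs, hk, htb⟩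
          by_cases hsm : s = m
          · exact hA ⟨hsm, List.mem_range.mpr hk, by rw [hsm] at htb; exact (pvAndPos m k).mpr htb⟩
          · exact h1 ⟨by omega, hk, htb⟩
        rw [if_neg h2]

-- let-free unfoldings of the two ports (definitional)
def pvCur (n : Nat) (A : List Int) (G : List (List Int)) (s : Nat) : Int :=
  pvMax ((List.range n).map (fun k => if s.testBit k then bestB n A G s k else 0))

theorem solve_eq (N M : Int) (A : List Int) (G : List (List Int)) :
    solve N M A G
      = pvMax ((List.range (pvTwoPow N.toNat)).filterMap (fun v =>
          if pvOnes (Int.ofNat v) = M then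
            some (pvMax ((List.range N.toNat).map (fun k =>
              ((List.range (1 <<< N.toNat)).foldl (fun dp s =>
                (List.range N.toNat).foldl (fun dp k =>
                  if s &&& pvTwoPow k > 0 then
                    (List.range N.toNat).foldl (fun dp w =>
                      if w ≠ k ∧ s &&& pvTwoPow w > 0 then
                        pvUpd dp s k (max (dp s k)
                          (dp (s ^^^ pvTwoPow k) w + (G.getD w []).getD k 0 + A.getD k 0))
                      else dp) dp
                  else dp) dp)
                ((List.range N.toNat).foldl (fun dp i => pvUpd dp (pvTwoPow i) i (A.getD i 0))
                  (fun _ _ => (0 : Int)))) v k)))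
          else none)) := rfl

theorem solve_alt_eq (N M : Int) (A : List Int) (G : List (List Int)) :
    solve_alt N M A G
      = ((List.range (1 <<< N.toNat)).foldl (fun acc s =>
          if pvOnes (Int.ofNat s) ≠ M then acc
          else match acc with
            | none => some (pvCur N.toNat A G s)
            | some a => if pvCur N.toNat A G s > a then some (pvCur N.toNat A G s)
                        else some a)
          (none : Option Int)).getD 0 := rfl

theorem pvAltStep_eq (n : Nat) (A : List Int) (G : List (List Int)) (M : Int) :
    (fun (acc : Option Int) (s : Nat) =>
      if pvOnes (Int.ofNat s) ≠ M then acc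
      else match acc with
        | none => some (pvCur n A G s)
        | some a => if pvCur n A G s > a then some (pvCur n A G s) else some a)
    = (fun (acc : Option Int) (s : Nat) =>
      if pvOnes (Int.ofNat s) = M then
        (fun (acc : Option Int) (cur : Int) => match acc with
          | none => some cur
          | some a => if cur > a then some cur else some a) acc (pvCur n A G s)
      else acc) := by
  funext acc s
  by_cases h : pvOnes (Int.ofNat s) = M
  · rw [if_neg (not_not_intro h), if_pos h]
  · rw [if_pos h, if_neg h]

-- ===== VERDICT (by name: the statement is the Claim_ definition above) =====
theorem solve_spec : Claim_equal_solve := by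
  intro N M A G _ _
  unfold Spec_solve
  rw [solve_eq, solve_alt_eq, pvAltStep_eq]
  rw [pvFoldFilter (fun s => pvOnes (Int.ofNat s) = M) (pvCur N.toNat A G)
    (fun (acc : Option Int) (cur : Int) => match acc with
      | none => some cur
      | some a => if cur > a then some cur else some a)]
  rw [pvOptFold]
  simp only [pvMainFold N.toNat A G (1 <<< N.toNat)]
  have hr : (1 : Nat) <<< N.toNat = pvTwoPow N.toNat := by
    rw [Nat.one_shiftLeft, pvTwoPow_eq]
  rw [hr]
  congr 1
  apply List.filterMap_congr
  intro v hv
  have hv' : v < pvTwoPow N.toNat := List.mem_range.mp hv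
  by_cases hov : pvOnes (Int.ofNat v) = M
  · rw [if_pos hov, if_pos hov]
    unfold pvCur
    congr 2
    apply List.map_congr_left
    intro k hk
    have hk' : k < N.toNat := List.mem_range.mp hk
    by_cases htb : v.testBit k = true
    · rw [if_pos ⟨hv', hk', htb⟩, if_pos htb]
    · rw [if_neg (fun h => htb h.2.2), if_neg htb]
      have : ¬(k < N.toNat ∧ v = pvTwoPow k) := by
        rintro ⟨_, h2⟩
        apply htb
        rw [h2, pvTwoPow_eq, Nat.testBit_two_pow]
        simp
      rw [if_neg this]
  · rw [if_neg hov, if_neg hov]
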